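-- pv_equiv track=rewrite | github.com/paulwxq/nl2sql_v3 | src/modules/sql_generation/subgraph/nodes/sql_generation.py | _format_table_categories
-- ===== SOURCE A (Python) =====
-- from typing import Any, Dict, List, Optional
--
-- def _format_table_categories(schema_context: Dict[str, Any]) -> str:
--     """
--     格式化表类型分组
--
--     根据 table_categories 按原始类型分组显示表
--
--     Args:
--         schema_context: Schema上下文，包含 table_categories 字典
--
--     Returns:
--         格式化后的表类型字符串，例如：
--         - 交易表: table1, table2
--         - 维度表: table3
--         - 桥接表: table4
--     """
--     table_categories = schema_context.get("table_categories", {})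
--     if not table_categories:
--         return "（无分类信息）"
--
--     # 按类型分组
--     category_groups: Dict[str, List[str]] = {}
--     for table_id, category in table_categories.items():
--         if category not in category_groups:
--             category_groups[category] = []
--         category_groups[category].append(table_id)
--
--     # 格式化输出
--     lines = []
--     for category in sorted(category_groups.keys()):
--         tables = category_groups[category]
--         tables_str = ", ".join(sorted(tables))
--         lines.append(f"  - {category}: {tables_str}")
--
--     return "\n".join(lines) if lines else "（无分类信息）"
-- ===== SOURCE B (Python) =====
-- def _format_table_categories(schema_context):
--     table_categories = schema_context.get("table_categories", {})
--     if not table_categories: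
--         return "（无分类信息）"
--     items = table_categories.items()
--     return "\n".join(
--         "  - {}: {}".format(c, ", ".join(sorted(t for t, cc in items if cc == c)))
--         for c in sorted(set(table_categories.values()))
--     )
-- ===== Notes on version B (the rewrite author's own statement) =====
-- stated objective: simpler
-- what changed: A builds an intermediate dict of category->tables lists in a grouping pass and then formats it; B drops the grouping structure entirely and renders one line per sorted distinct category, selecting that category's tables with a filter inside a single join expression.
import Mathlib
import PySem

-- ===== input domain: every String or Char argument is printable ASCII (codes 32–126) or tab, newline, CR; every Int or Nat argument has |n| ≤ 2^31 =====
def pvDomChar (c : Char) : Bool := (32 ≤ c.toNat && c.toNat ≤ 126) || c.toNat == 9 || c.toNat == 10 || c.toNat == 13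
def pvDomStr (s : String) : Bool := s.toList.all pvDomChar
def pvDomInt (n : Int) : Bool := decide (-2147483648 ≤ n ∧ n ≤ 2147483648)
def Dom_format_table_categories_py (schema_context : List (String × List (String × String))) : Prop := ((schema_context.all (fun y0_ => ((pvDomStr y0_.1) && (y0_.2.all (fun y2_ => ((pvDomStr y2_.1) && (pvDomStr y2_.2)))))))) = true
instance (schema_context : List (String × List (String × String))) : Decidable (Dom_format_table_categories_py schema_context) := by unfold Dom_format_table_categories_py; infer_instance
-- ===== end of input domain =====

-- B replaces A's dict-of-lists grouping pass by a direct rendering over the sorted distinct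
-- categories, collecting each category's tables by a filter (objective: simpler).

-- ===== PORT A =====
-- loop body of A's grouping pass: "if category not in category_groups: … = []; …append(table_id)"
def pvGroupStep (g : PySem.Dict String (List String)) (p : String × String) : PySem.Dict String (List String) :=
  let g1 := if g.contains p.2 then g else g.insert p.2 []
  g1.modify p.2 [] (fun l => l ++ [p.1])

def format_table_categories_py (schema_context : List (String × List (String × String))) : String :=
  let table_categories := (PySem.Dict.get? (PySem.Dict.mk schema_context) "table_categories").getD []
  if table_categories.isEmpty then "（无分类信息）"
  else
    let category_groups := table_categories.foldl pvGroupStep PySem.Dict.empty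
    let lines := (PySem.List.sorted category_groups.keys (fun x => x) false).foldl
      (fun acc category =>
        acc ++ ["  - " ++ category ++ ": " ++
          PySem.Str.join ", " (PySem.List.sorted (category_groups.getD category []) (fun x => x) false)]) []
    if lines.isEmpty then "（无分类信息）" else PySem.Str.join "\n" lines

-- ===== PORT B =====
def format_table_categories_py_alt (schema_context : List (String × List (String × String))) : String :=
  let table_categories := (PySem.Dict.get? (PySem.Dict.mk schema_context) "table_categories").getD []
  if table_categories.isEmpty then "（无分类信息）"
  else
    PySem.Str.join "\n"
      ((PySem.List.sorted (PySem.Set.ofList (table_categories.map (·.2))) (fun x => x) false).map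
        (fun c => "  - " ++ c ++ ": " ++
          PySem.Str.join ", "
            (PySem.List.sorted ((table_categories.filter (fun p => p.2 == c)).map (·.1)) (fun x => x) false)))

-- ===== PRECONDITION & SPEC =====
def Spec_format_table_categories_py (schema_context : List (String × List (String × String))) (out : String) : Prop := out = format_table_categories_py_alt schema_context
instance (schema_context : List (String × List (String × String))) (out : String) : Decidable (Spec_format_table_categories_py schema_context out) := by unfold Spec_format_table_categories_py; infer_instance

-- ===== CLAIM (what is proved, stated in full; the proofs are below) =====
def Claim_equal_format_table_categories_py : Prop := ∀ (schema_context : List (String × List (String × String))), Dom_format_table_categories_py schema_context → Spec_format_table_categories_py schema_context (format_table_categories_py schema_context)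

-- ===== LEMMAS AND PROOFS =====

-- one grouping step appends p.1 to bucket p.2 and leaves every other bucket alone
theorem pvGroupStep_getD (g : PySem.Dict String (List String)) (p : String × String) (c : String) :
    (pvGroupStep g p).getD c [] = g.getD c [] ++ (if p.2 == c then [p.1] else []) := by
  unfold pvGroupStep
  by_cases hc : g.contains p.2 = true
  · by_cases hce : c = p.2
    · simp [hc, hce]
    · have hbe : (p.2 == c) = false := by
        simp only [beq_eq_false_iff_ne]; exact fun h => hce h.symm
      simp [hc, PySem.Dict.getD_modify, hce, hbe]
  · by_cases hce : c = p.2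
    · simp [hc, hce,
        PySem.Dict.getD_of_not_contains g ([] : List String) (by simpa using hc)]
    · have hbe : (p.2 == c) = false := by
        simp only [beq_eq_false_iff_ne]; exact fun h => hce h.symm
      simp [hc, PySem.Dict.getD_modify, PySem.Dict.getD_insert, hce, hbe]

theorem pvGroupStep_keys (g : PySem.Dict String (List String)) (p : String × String) :
    (pvGroupStep g p).keys = PySem.Set.add g.keys p.2 := by
  unfold pvGroupStep
  by_cases hc : g.contains p.2 = true
  · have hm : p.2 ∈ g.keys := (PySem.Dict.contains_iff_mem_keys ..).mp hc
    simp [hc, PySem.Dict.keys_modify, PySem.Set.add, hm,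
      PySem.Dict.keys_insert_of_contains g _ hc]
  · have hm : p.2 ∉ g.keys := fun h => hc ((PySem.Dict.contains_iff_mem_keys ..).mpr h)
    simp [hc, PySem.Dict.keys_modify, PySem.Set.add, hm,
      PySem.Dict.keys_insert_of_contains (g.insert p.2 []) _ (PySem.Dict.contains_insert_self ..),
      PySem.Dict.keys_insert_of_not_contains g ([] : List String) (by simpa using hc)]

-- the whole grouping fold, bucket contents
theorem pvFold_getD (l : List (String × String)) (g : PySem.Dict String (List String)) (c : String) :
    (l.foldl pvGroupStep g).getD c [] = g.getD c [] ++ (l.filter (fun p => p.2 == c)).map (·.1) := by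
  induction l generalizing g with
  | nil => simp
  | cons p t ih =>
    simp only [List.foldl_cons, ih, pvGroupStep_getD, List.filter_cons]
    by_cases h : (p.2 == c) = true <;> simp [h]

-- the whole grouping fold, key set
theorem pvFold_keys (l : List (String × String)) (g : PySem.Dict String (List String)) :
    (l.foldl pvGroupStep g).keys = (l.map (·.2)).foldl PySem.Set.add g.keys := by
  induction l generalizing g with
  | nil => rfl
  | cons p t ih => simp [List.foldl_cons, ih, pvGroupStep_keys]

-- ===== VERDICT (by name: the statement is the Claim_ definition above) =====
theorem format_table_categories_py_spec : Claim_equal_format_table_categories_py := by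
  intro schema_context _
  unfold Spec_format_table_categories_py format_table_categories_py format_table_categories_py_alt
  set tc := (PySem.Dict.get? (PySem.Dict.mk schema_context) "table_categories").getD [] with htc
  by_cases he : tc.isEmpty
  · simp [he]
  · simp only [he, if_false, Bool.false_eq_true]
    set g := tc.foldl pvGroupStep PySem.Dict.empty with hgdef
    have hkeys : g.keys = PySem.Set.ofList (tc.map (·.2)) := by
      rw [hgdef, pvFold_keys, PySem.Set.ofList_eq_foldl]; simp
    have hg : ∀ c, g.getD c [] = (tc.filter (fun p => p.2 == c)).map (·.1) := by
      intro c; rw [hgdef, pvFold_getD]; simp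
    rw [PySem.List.foldl_append_singleton_eq_map
      (fun category => "  - " ++ category ++ ": " ++
        PySem.Str.join ", " (PySem.List.sorted (g.getD category []) (fun x => x) false))]
    simp only [List.nil_append, hkeys, hg]
    have hne : PySem.List.sorted (PySem.Set.ofList (tc.map (·.2))) (fun x => x) false ≠ [] := by
      rw [Ne, PySem.List.sorted_eq_nil_iff]
      intro h
      rcases List.isEmpty_eq_false_iff_exists_mem.mp (by simpa using he) with ⟨p, hp⟩
      have : p.2 ∈ PySem.Set.ofList (tc.map (·.2)) :=
        (PySem.Set.mem_ofList ..).mpr (List.mem_map_of_mem hp)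
      simp [h] at this
    simp [List.isEmpty_eq_false_iff_exists_mem.mpr
      ⟨_, List.mem_map_of_mem (List.exists_mem_of_ne_nil _ hne).choose_spec⟩]
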